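-- pv_equiv track=rewrite | github.com/pypi-data/pypi-mirror-383 | packages/argus-recon/argus_recon-2.0.0.tar.gz/argus_recon-2.0.0/argus/modules/typosquat_domain_checker.py | gen_homoglyph
-- ===== SOURCE A (Python) =====
-- from itertools import product
--
-- glyph_map = {
--     "a":["a","4","@",],
--     "b":["b","8"],
--     "c":["c","k","s"],
--     "d":["d"],
--     "e":["e","3"],
--     "f":["f"],
--     "g":["g","9"],
--     "h":["h"],
--     "i":["i","1","l","!"],
--     "j":["j"],
--     "k":["k","c"],
--     "l":["l","1","i"],
--     "m":["m","rn"],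
--     "n":["n"],
--     "o":["o","0"],
--     "p":["p"],
--     "q":["q"],
--     "r":["r"],
--     "s":["s","5","z"],
--     "t":["t","7"],
--     "u":["u","v"],
--     "v":["v","u"],
--     "w":["w","vv"],
--     "x":["x"],
--     "y":["y"],
--     "z":["z","2"],
--     "-":["","-"]
-- }
--
-- def gen_homoglyph(s):
--     pools=[glyph_map.get(c.lower(),[c]) for c in s]
--     combos=[]
--     for tup in product(*pools):
--         combos.append("".join(tup))
--         if len(combos)>200:
--             break
--     return combos
-- ===== SOURCE B (Python) =====
-- glyph_map = {
--     "a":["a","4","@",],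
--     "b":["b","8"],
--     "c":["c","k","s"],
--     "d":["d"],
--     "e":["e","3"],
--     "f":["f"],
--     "g":["g","9"],
--     "h":["h"],
--     "i":["i","1","l","!"],
--     "j":["j"],
--     "k":["k","c"],
--     "l":["l","1","i"],
--     "m":["m","rn"],
--     "n":["n"],
--     "o":["o","0"],
--     "p":["p"],
--     "q":["q"],
--     "r":["r"],
--     "s":["s","5","z"],
--     "t":["t","7"],
--     "u":["u","v"],
--     "v":["v","u"],
--     "w":["w","vv"],
--     "x":["x"],
--     "y":["y"],
--     "z":["z","2"],
--     "-":["","-"]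
-- }
--
-- def gen_homoglyph(s):
--     # combo #j of product(*pools) picks glyph (j // suffixprod(i+1)) % len(pool_i) from pool i
--     # (last pool varies fastest); only the first min(201, total) combos are wanted, so suffix
--     # products are capped at 201 and every position with capped suffix >= 201 (or a 1-glyph
--     # pool) is frozen at its first glyph; frozen stretches are pre-joined once.
--     pools = [glyph_map.get(c.lower(), [c]) for c in s]
--     n = len(pools)
--     suffix = [1] * (n + 1)
--     for i in range(n - 1, -1, -1):
--         suffix[i] = min(201, suffix[i + 1] * len(pools[i]))
--     count = min(201, suffix[0])
--     var = [i for i in range(n) if len(pools[i]) > 1 and suffix[i + 1] < 201]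
--     fixed = []
--     prev = 0
--     for v in var:
--         fixed.append("".join(pools[i][0] for i in range(prev, v)))
--         prev = v + 1
--     fixed.append("".join(pools[i][0] for i in range(prev, n)))
--     out = []
--     for j in range(count):
--         parts = []
--         for t in range(len(var)):
--             v = var[t]
--             parts.append(fixed[t])
--             parts.append(pools[v][(j // suffix[v + 1]) % len(pools[v])])
--         parts.append(fixed[len(var)])
--         out.append("".join(parts))
--     return out
-- ===== Notes on version B (the rewrite author's own statement) =====
-- stated objective: faster
-- what changed: Instead of streaming itertools.product and breaking at 201 combos, B indexes the first min(201, total) combos directly by mixed-radix arithmetic over 201-capped suffix products of pool sizes, freezing every non-varying position at its first glyph and pre-joining the frozen stretches once.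
import Mathlib
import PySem

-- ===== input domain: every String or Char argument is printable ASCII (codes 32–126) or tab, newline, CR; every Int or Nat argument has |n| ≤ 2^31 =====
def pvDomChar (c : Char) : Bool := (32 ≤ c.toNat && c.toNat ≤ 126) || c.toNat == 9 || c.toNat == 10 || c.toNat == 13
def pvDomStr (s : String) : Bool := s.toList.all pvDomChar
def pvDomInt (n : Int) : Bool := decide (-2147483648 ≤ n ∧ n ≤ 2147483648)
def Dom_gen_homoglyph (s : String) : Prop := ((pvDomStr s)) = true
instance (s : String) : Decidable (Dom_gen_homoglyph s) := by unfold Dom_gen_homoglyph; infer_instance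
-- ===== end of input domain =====

-- B replaces the lazy itertools.product stream (+ early break at 201 combos) by direct mixed-radix
-- indexing of the first min(201, total) combos over capped suffix products (objective: faster).

-- shared module-level constant: the glyph_map dict literal
def glyphMap : PySem.Dict String (List String) := PySem.Dict.mk [
  ("a", ["a","4","@"]), ("b", ["b","8"]), ("c", ["c","k","s"]), ("d", ["d"]),
  ("e", ["e","3"]), ("f", ["f"]), ("g", ["g","9"]), ("h", ["h"]),
  ("i", ["i","1","l","!"]), ("j", ["j"]), ("k", ["k","c"]), ("l", ["l","1","i"]),
  ("m", ["m","rn"]), ("n", ["n"]), ("o", ["o","0"]), ("p", ["p"]), ("q", ["q"]),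
  ("r", ["r"]), ("s", ["s","5","z"]), ("t", ["t","7"]), ("u", ["u","v"]),
  ("v", ["v","u"]), ("w", ["w","vv"]), ("x", ["x"]), ("y", ["y"]), ("z", ["z","2"]),
  ("-", ["", "-"])]

-- glyph_map.get(c.lower(), [c]) for a single character c (both Pythons contain this very expression)
def poolFor (c : Char) : List String :=
  glyphMap.getD (PySem.Str.lower (String.mk [c])) [String.mk [c]]

-- ===== PORT A =====
-- A iterates the lazy product(*pools) stream, appending the joined tuple and breaking once
-- len(combos) > 200.  The lazy stream + break is ported as a depth-first enumeration (goA over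
-- the remaining pools, goPool = the loop over one pool) that stops appending once 201 combos exist.
mutual
def goA : List (List String) → String → List String → List String
  | [], pre, combos => if combos.length ≥ 201 then combos else combos ++ [pre]
  | p :: ps, pre, combos => if combos.length ≥ 201 then combos else goPool p ps pre combos
  termination_by pools _ _ => (pools.length, 0)
def goPool : List String → List (List String) → String → List String → List String
  | [], _, _, combos => combos
  | g :: gs, ps, pre, combos => goPool gs ps pre (goA ps (pre ++ g) combos)
  termination_by p ps _ _ => (ps.length, p.length)
end


def gen_homoglyph (s : String) : List String :=
  let pools := s.toList.map (fun c => poolFor c)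
  goA pools "" []

-- ===== PORT B =====
-- B indexes product(*pools) directly: combo #j picks glyph (j // suffixprod(i+1)) % len(pool_i)
-- from pool i.  Suffix products are capped at 201; positions that cannot vary among the first
-- min(201, total) combos are frozen at their first glyph and pre-joined into fixed runs.

-- suffix[i] = min(201, product of len(pools[j]) for j >= i), built back to front
def suffixes : List (List String) → List Nat
  | [] => [1]
  | p :: ps =>
    let t := suffixes ps
    min 201 (t.headD 1 * p.length) :: t

-- "".join(pools[i][0] for i in range(a, b))
def joinFirsts (pools : List (List String)) (a b : ℕ) : String :=
  String.join ((List.range' a (b - a)).map (fun i => (pools.getD i []).getD 0 ""))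

-- the fixed runs of first glyphs around the varying positions
def buildFixed (pools : List (List String)) : ℕ → List ℕ → List String
  | prev, [] => [joinFirsts pools prev pools.length]
  | prev, v :: vs => joinFirsts pools prev v :: buildFixed pools (v + 1) vs

-- the parts list of combo #j (loop over enumerate(var), then the trailing fixed run)
def buildParts (pools : List (List String)) (suffix : List Nat) :
    List String → List ℕ → ℕ → List String
  | fixed, [], _ => [fixed.headD ""]
  | fixed, v :: vs, j =>
    fixed.headD "" ::
      (pools.getD v []).getD ((j / suffix.getD (v + 1) 1) % (pools.getD v []).length) "" ::
      buildParts pools suffix fixed.tail vs j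

-- list indices (pools[i], suffix[i+1], fixed[t]) are always in range in the Python; getD is exact there
def gen_homoglyph_alt (s : String) : List String :=
  let pools := s.toList.map (fun c => poolFor c)
  let n := pools.length
  let suffix := suffixes pools
  let count := min 201 (suffix.getD 0 1)
  let var := (List.range n).filter
    (fun i => decide (1 < (pools.getD i []).length) && decide (suffix.getD (i + 1) 1 < 201))
  let fixed := buildFixed pools 0 var
  (List.range count).map (fun j => String.join (buildParts pools suffix fixed var j))

-- ===== PRECONDITION & SPEC =====
def Spec_gen_homoglyph (s : String) (out : List String) : Prop := out = gen_homoglyph_alt s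
instance (s : String) (out : List String) : Decidable (Spec_gen_homoglyph s out) := by unfold Spec_gen_homoglyph; infer_instance

-- ===== CLAIM (what is proved, stated in full; the proofs are below) =====
def Claim_equal_gen_homoglyph : Prop := ∀ (s : String), Dom_gen_homoglyph s → Spec_gen_homoglyph s (gen_homoglyph s)

-- ===== LEMMAS AND PROOFS =====

-- the full cartesian product of the pools, in product(*pools) order (last pool varies fastest)
def prodAll : List (List String) → List String
  | [] => [""]
  | p :: ps => p.flatMap (fun g => (prodAll ps).map (fun t => g ++ t))

-- ---- A side: the capped DFS computes the first 201 elements of the full product ----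

theorem take_append_take (l m : List String) (n : ℕ) :
    (l.take n ++ m).take n = (l ++ m).take n := by
  have h : n - min n l.length = n - l.length := by omega
  simp [List.take_append, List.take_take, h]

theorem goA_eq : ∀ (ps : List (List String)) (pre : String) (combos : List String),
    combos.length ≤ 201 →
    goA ps pre combos = (combos ++ (prodAll ps).map (fun t => pre ++ t)).take 201 := by
  intro ps
  induction ps with
  | nil =>
    intro pre combos h
    by_cases h2 : combos.length ≥ 201
    · have hl : combos.length = 201 := by omega
      simp only [goA, if_pos h2, prodAll, List.map_cons, List.map_nil, List.take_append, hl,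
        Nat.sub_self, List.take_zero, List.append_nil]
      exact (List.take_of_length_le hl.le).symm
    · simp only [goA, if_neg h2, prodAll, List.map_cons, List.map_nil]
      rw [List.take_of_length_le (by simp; omega)]
      simp
  | cons p ps ih =>
    have hpool : ∀ (gs : List String) (pre : String) (combos : List String),
        combos.length ≤ 201 →
        goPool gs ps pre combos =
          (combos ++ gs.flatMap (fun g => (prodAll ps).map (fun t => pre ++ g ++ t))).take 201 := by
      intro gs
      induction gs with
      | nil =>
        intro pre combos h
        simp only [goPool, List.flatMap_nil, List.append_nil]
        exact (List.take_of_length_le h).symm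
      | cons g gs ihg =>
        intro pre combos h
        rw [goPool, ih (pre ++ g) combos h,
          ihg pre _ (by simpa using List.length_take_le 201 _)]
        rw [take_append_take, List.flatMap_cons, ← List.append_assoc]
    intro pre combos h
    by_cases h2 : combos.length ≥ 201
    · have hl : combos.length = 201 := by omega
      rw [goA, if_pos h2, List.take_append, hl, Nat.sub_self, List.take_zero, List.append_nil]
      exact (List.take_of_length_le hl.le).symm
    · rw [goA, if_neg h2, hpool p pre combos h]
      congr 1
      simp [prodAll, List.map_flatMap, List.map_map, Function.comp_def, String.append_assoc]

theorem poolFor_ne_nil (c : Char) : poolFor c ≠ [] := by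
  unfold poolFor
  rw [PySem.Dict.getD_eq_get?_getD]
  cases h : glyphMap.get? (PySem.Str.lower (String.mk [c])) with
  | none => simp
  | some v =>
    simp only [Option.getD_some]
    have hm := PySem.Dict.mem_items_of_get?_eq_some glyphMap h
    simp only [glyphMap] at hm
    simp only [List.mem_cons, List.not_mem_nil, or_false, Prod.mk.injEq] at hm
    rcases hm with hm|hm|hm|hm|hm|hm|hm|hm|hm|hm|hm|hm|hm|hm|hm|hm|hm|hm|hm|hm|hm|hm|hm|hm|hm|hm|hm <;>
      (rw [hm.2]; simp)

-- ---- String.join toolkit ----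

theorem foldl_append_init (a : List String) : ∀ (init : String),
    a.foldl (· ++ ·) init = init ++ a.foldl (· ++ ·) "" := by
  induction a with
  | nil => intro init; simp
  | cons x a ih =>
    intro init
    rw [List.foldl_cons, List.foldl_cons, ih (init ++ x), ih ("" ++ x), String.empty_append,
      String.append_assoc]

theorem join_cons (x : String) (a : List String) : String.join (x :: a) = x ++ String.join a := by
  simp only [String.join, List.foldl_cons, String.empty_append]
  exact foldl_append_init a x

theorem join_append (a b : List String) : String.join (a ++ b) = String.join a ++ String.join b := by
  induction a with
  | nil =>
    have h : String.join ([] : List String) = "" := rfl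
    rw [List.nil_append, h, String.empty_append]
  | cons x a ih =>
    rw [List.cons_append, join_cons, join_cons, ih, String.append_assoc]

-- ---- the length and elements of prodAll ----

theorem length_prodAll_cons (p : List String) (ps : List (List String)) :
    (prodAll (p :: ps)).length = p.length * (prodAll ps).length := by
  simp [prodAll, List.length_flatMap]

theorem length_prodAll_pos : ∀ (ps : List (List String)), (∀ p ∈ ps, p ≠ []) →
    0 < (prodAll ps).length := by
  intro ps
  induction ps with
  | nil => intro _; simp [prodAll]
  | cons p ps ih =>
    intro h
    rw [length_prodAll_cons]
    have hp : p ≠ [] := h p (by simp)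
    exact Nat.mul_pos (List.length_pos_iff.mpr hp) (ih (fun q hq => h q (by simp [hq])))

-- element j of a flatMap of equal-sized blocks
theorem getD_flatMap_block (ys : List String) (hys : 0 < ys.length) :
    ∀ (p : List String) (j : ℕ), j < p.length * ys.length →
    (p.flatMap (fun g => ys.map (fun t => g ++ t))).getD j "" =
      p.getD (j / ys.length) "" ++ ys.getD (j % ys.length) "" := by
  intro p
  induction p with
  | nil => intro j hj; simp at hj
  | cons g p ih =>
    intro j hj
    rw [List.flatMap_cons, List.getD_eq_getElem?_getD, List.getElem?_append]
    by_cases hlt : j < ys.length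
    · rw [if_pos (by simpa using hlt), List.getElem?_map]
      rw [Nat.div_eq_of_lt hlt, Nat.mod_eq_of_lt hlt]
      have : ys[j]? = some ys[j] := List.getElem?_eq_getElem hlt
      simp [this, List.getD_eq_getElem?_getD]
    · obtain ⟨m, rfl⟩ : ∃ m, j = m + ys.length := ⟨j - ys.length, by omega⟩
      rw [if_neg (by simpa using hlt)]
      simp only [List.length_map, Nat.add_sub_cancel]
      rw [← List.getD_eq_getElem?_getD, ih m (by rw [List.length_cons] at hj; nlinarith)]
      rw [Nat.add_div_right _ hys, Nat.add_mod_right]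
      simp
    
-- the total product length splits around any position
theorem length_prodAll_split : ∀ (ps : List (List String)) (i : ℕ), i < ps.length →
    ∃ K, (prodAll ps).length =
      K * ((ps.getD i []).length * (prodAll (ps.drop (i + 1))).length) := by
  intro ps
  induction ps with
  | nil => intro i hi; simp at hi
  | cons p ps ih =>
    intro i hi
    cases i with
    | zero => exact ⟨1, by simpa [length_prodAll_cons] using rfl⟩
    | succ i =>
      obtain ⟨K, hK⟩ := ih i (by simpa using hi)
      exact ⟨p.length * K, by rw [List.drop_succ_cons, List.getD_cons_succ,
        length_prodAll_cons, hK]; ring⟩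

theorem digit_mod (j K L d : ℕ) (hd : 0 < d) :
    j % (K * (L * d)) / d % L = j / d % L := by
  have h1 : K * (L * d) = d * (K * L) := by ring
  rw [h1, Nat.mod_mul_right_div_self, Nat.mod_mod_of_dvd _ ⟨K, mul_comm K L⟩]

-- mixed-radix characterisation of the product elements
theorem getD_prodAll : ∀ (ps : List (List String)), (∀ p ∈ ps, p ≠ []) →
    ∀ (j : ℕ), j < (prodAll ps).length →
    (prodAll ps).getD j "" =
      String.join ((List.range ps.length).map (fun i =>
        (ps.getD i []).getD
          ((j / (prodAll (ps.drop (i + 1))).length) % (ps.getD i []).length) "")) := by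
  intro ps
  induction ps with
  | nil =>
    intro _ j hj
    have hj0 : j = 0 := by simp [prodAll] at hj; omega
    subst hj0
    rfl
  | cons p ps ih =>
    intro h j hj
    have hps : ∀ q ∈ ps, q ≠ [] := fun q hq => h q (by simp [hq])
    have hN : 0 < (prodAll ps).length := length_prodAll_pos ps hps
    rw [length_prodAll_cons] at hj
    have hblock := getD_flatMap_block (prodAll ps) hN p j hj
    have hj' : j < (prodAll ps).length * p.length := by rw [Nat.mul_comm]; exact hj
    have hdiv : j / (prodAll ps).length < p.length := Nat.div_lt_of_lt_mul hj'
    rw [show prodAll (p :: ps) = p.flatMap (fun g => (prodAll ps).map (fun t => g ++ t)) from rfl,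
      hblock, ih hps (j % (prodAll ps).length) (Nat.mod_lt _ hN)]
    rw [List.length_cons, List.range_succ_eq_map, List.map_cons, join_cons, List.map_map]
    congr 1
    · simp only [List.getD_cons_zero, List.drop_succ_cons, List.drop_zero]
      rw [Nat.mod_eq_of_lt hdiv]
    · congr 1
      apply List.map_congr_left
      intro i hi
      simp only [Function.comp_def, Nat.succ_eq_add_one, List.getD_cons_succ,
        List.drop_succ_cons]
      obtain ⟨K, hK⟩ := length_prodAll_split ps i (List.mem_range.mp hi)
      have hdpos : 0 < (prodAll (ps.drop (i + 1))).length :=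
        length_prodAll_pos _ (fun q hq => hps q (List.drop_subset _ _ hq))
      rw [hK, digit_mod j K _ _ hdpos]

-- ---- B side: the capped suffix products ----

theorem suffixes_getD : ∀ (ps : List (List String)), (∀ p ∈ ps, p ≠ []) → ∀ (i : ℕ),
    (suffixes ps).getD i 1 = min 201 (prodAll (ps.drop i)).length := by
  intro ps
  induction ps with
  | nil =>
    intro _ i
    cases i <;> simp [suffixes, prodAll]
  | cons p ps ih =>
    intro h i
    have hps : ∀ q ∈ ps, q ≠ [] := fun q hq => h q (by simp [hq])
    cases i with
    | succ i => simpa [suffixes] using ih hps i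
    | zero =>
      obtain ⟨a, t, hsp⟩ : ∃ a t, suffixes ps = a :: t := by
        cases hs : suffixes ps with
        | nil => cases ps <;> simp [suffixes] at hs
        | cons a t => exact ⟨a, t, rfl⟩
      have hhead : (suffixes ps).headD 1 = min 201 (prodAll ps).length := by
        rw [hsp]
        have := ih hps 0
        rw [hsp, List.drop_zero] at this
        exact this
      simp only [suffixes, List.getD_cons_zero, List.drop_zero, length_prodAll_cons]
      rw [hhead]
      have hL : 0 < p.length := List.length_pos_iff.mpr (h p (by simp))
      rcases Nat.lt_or_ge 201 (prodAll ps).length with hlt | hge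
      · rw [Nat.min_eq_left hlt.le, Nat.min_eq_left, Nat.min_eq_left]
        · calc 201 ≤ (prodAll ps).length := hlt.le
            _ ≤ p.length * (prodAll ps).length := Nat.le_mul_of_pos_left _ hL
        · calc (201 : ℕ) = 201 * 1 := by omega
            _ ≤ 201 * p.length := by exact Nat.mul_le_mul_left _ hL
      · rw [Nat.min_eq_right hge, Nat.mul_comm]

-- ---- B side: joining parts = position-wise choice ----

theorem build_join (pools : List (List String)) (suffix : List Nat) (j : ℕ) :
    ∀ (var : List ℕ) (prev : ℕ),
    (∀ v ∈ var, prev ≤ v ∧ v < pools.length) → List.Pairwise (· < ·) var →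
    String.join (buildParts pools suffix (buildFixed pools prev var) var j) =
      String.join ((List.range' prev (pools.length - prev)).map (fun i =>
        if i ∈ var then
          (pools.getD i []).getD
            ((j / suffix.getD (i + 1) 1) % (pools.getD i []).length) ""
        else (pools.getD i []).getD 0 "")) := by
  intro var
  induction var with
  | nil =>
    intro prev _ _
    simp only [buildFixed, buildParts, List.headD_cons]
    rw [join_cons, show String.join ([] : List String) = "" from rfl, String.append_empty]
    unfold joinFirsts
    congr 1
  | cons v vs ih =>
    intro prev hsub hpair
    obtain ⟨hpv, hvn⟩ := hsub v (by simp)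
    have hvs : ∀ u ∈ vs, v < u := fun u hu => (List.pairwise_cons.mp hpair).1 u hu
    -- left side
    simp only [buildFixed, buildParts, List.headD_cons, List.tail_cons]
    rw [join_cons, join_cons,
      ih (v + 1) (fun u hu => ⟨hvs u hu, (hsub u (by simp [hu])).2⟩)
        (List.pairwise_cons.mp hpair).2]
    -- right side: split the range at v
    have hsplit : pools.length - prev = (v - prev) + (1 + (pools.length - (v + 1))) := by omega
    rw [hsplit, ← List.range'_append (s := prev) (m := v - prev) (step := 1),
      show prev + 1 * (v - prev) = v by omega,
      show (1 : ℕ) + (pools.length - (v + 1)) = (pools.length - (v + 1)) + 1 from by omega]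
    rw [List.range'_succ]
    rw [List.map_append, List.map_cons, join_append, join_cons]
    congr 1
    · -- first fixed run
      unfold joinFirsts
      congr 1
      apply List.map_congr_left
      intro i hi
      have hiv : i < v := by
        have := List.mem_range'_1.mp hi
        omega
      rw [if_neg]
      intro hmem
      rcases List.mem_cons.mp hmem with rfl | hmem'
      · omega
      · exact absurd (hvs i hmem') (by omega)
    congr 1
    · -- the varying position v itself
      rw [if_pos (by simp)]
    · -- the rest
      apply congrArg
      apply List.map_congr_left
      intro i hi
      have hgt : v < i := by
        have := List.mem_range'_1.mp hi
        omega
      by_cases hmem : i ∈ vs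
      · rw [if_pos hmem, if_pos (show i ∈ v :: vs from by simp [hmem])]
      · rw [if_neg hmem,
          if_neg (show i ∉ v :: vs from by simp only [List.mem_cons, hmem, or_false]; omega)]

-- take n of a list as a map over range
theorem take_eq_range_map (xs : List String) (n : ℕ) :
    xs.take n = (List.range (min n xs.length)).map (fun j => xs.getD j "") := by
  apply List.ext_getElem
  · simp
  · intro i h1 h2
    have hi : i < xs.length := by simp at h1; omega
    rw [List.getElem_take, List.getElem_map, List.getElem_range,
      List.getD_eq_getElem?_getD, List.getElem?_eq_getElem hi]
    rfl

-- ===== VERDICT (by name: the statement is the Claim_ definition above) =====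
theorem gen_homoglyph_spec : Claim_equal_gen_homoglyph := by
  intro s _
  simp only [Spec_gen_homoglyph, gen_homoglyph, gen_homoglyph_alt]
  have hne : ∀ p ∈ s.toList.map (fun c => poolFor c), p ≠ [] := by
    intro p hp
    simp only [List.mem_map] at hp
    obtain ⟨c, _, rfl⟩ := hp
    exact poolFor_ne_nil c
  set pools := s.toList.map (fun c => poolFor c) with hpools
  rw [goA_eq _ "" [] (by simp)]
  rw [List.nil_append, List.map_congr_left (fun t _ => String.empty_append), List.map_id']
  -- A's value is the first min(201, total) product elements
  rw [take_eq_range_map]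
  -- B's count is the same bound
  have hcount : min 201 ((suffixes pools).getD 0 1) = min 201 (prodAll pools).length := by
    rw [suffixes_getD pools hne 0, List.drop_zero]
    omega
  rw [hcount]
  -- pointwise over j
  apply List.map_congr_left
  intro j hj
  have hj201 : j < 201 := by have := List.mem_range.mp hj; omega
  have hjN : j < (prodAll pools).length := by have := List.mem_range.mp hj; omega
  -- var is a sorted list of in-range positions
  have hvar_sub : ∀ v ∈ (List.range pools.length).filter
      (fun i => decide (1 < (pools.getD i []).length) &&
        decide ((suffixes pools).getD (i + 1) 1 < 201)), 0 ≤ v ∧ v < pools.length := by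
    intro v hv
    have := List.mem_range.mp (List.mem_of_mem_filter hv)
    omega
  have hvar_pair : List.Pairwise (· < ·) ((List.range pools.length).filter
      (fun i => decide (1 < (pools.getD i []).length) &&
        decide ((suffixes pools).getD (i + 1) 1 < 201))) :=
    (List.pairwise_lt_range).filter _
  rw [build_join pools (suffixes pools) j _ 0 hvar_sub hvar_pair]
  rw [Nat.sub_zero, ← List.range_eq_range']
  rw [getD_prodAll pools hne j hjN]
  congr 1
  apply List.map_congr_left
  intro i hi
  have hin : i < pools.length := List.mem_range.mp hi
  have hdpos : 0 < (prodAll (pools.drop (i + 1))).length :=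
    length_prodAll_pos _ (fun q hq => hne q (List.drop_subset _ _ hq))
  have hLpos : 0 < (pools.getD i []).length := by
    apply List.length_pos_iff.mpr
    apply hne
    rw [List.getD_eq_getElem?_getD, List.getElem?_eq_getElem hin]
    exact List.getElem_mem hin
  have hsuf : (suffixes pools).getD (i + 1) 1 =
      min 201 (prodAll (pools.drop (i + 1))).length := suffixes_getD pools hne (i + 1)
  by_cases hmem : i ∈ (List.range pools.length).filter
      (fun i => decide (1 < (pools.getD i []).length) &&
        decide ((suffixes pools).getD (i + 1) 1 < 201))
  · rw [if_pos hmem]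
    have hp := List.of_mem_filter hmem
    simp only [Bool.and_eq_true, decide_eq_true_eq] at hp
    rw [hsuf] at hp ⊢
    rw [Nat.min_eq_right (by omega)]
  · rw [if_neg hmem]
    have hp : ¬ (1 < (pools.getD i []).length ∧ (suffixes pools).getD (i + 1) 1 < 201) := by
      intro ⟨h1, h2⟩
      exact hmem (List.mem_filter.mpr ⟨List.mem_range.mpr hin, by simp only [Bool.and_eq_true, decide_eq_true_eq]; exact ⟨h1, h2⟩⟩)
    rw [hsuf] at hp
    push_neg at hp
    by_cases hL : 1 < (pools.getD i []).length
    · -- frozen because the suffix product is already ≥ 201 : digit is 0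
      have h201 : 201 ≤ (prodAll (pools.drop (i + 1))).length := by
        have := hp hL
        omega
      rw [Nat.div_eq_of_lt (by omega), Nat.zero_mod]
    · -- a one-glyph pool : digit is 0 mod 1
      have hL1 : (pools.getD i []).length = 1 := by omega
      rw [hL1, Nat.mod_one]
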